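-- pv_equiv track=rewrite | github.com/Mike-Alecci/Database_Repository_SSW810 | Michael_Alecci_HW5.py | covers_alphabet
-- ===== SOURCE A (Python) =====
-- def covers_alphabet(check):
--     """This function checks to see if every letter in the alphabet is contained within a given sentence"""
--     answer = True
--     check = check.lower()
--     for letter in "abcdefghijklomnopqrstuvwxyz":
--         if letter not in check:
--             answer = False
--             break                   #no need to continue if any letter is not contained
--     return answer
-- ===== SOURCE B (Python) =====
-- def covers_alphabet(check):
--     """This function checks to see if every letter in the alphabet is contained within a given sentence"""
--     mask = 0
--     for ch in check:
--         o = ord(ch)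
--         if 97 <= o <= 122:
--             mask |= 1 << (o - 97)
--         elif 65 <= o <= 90:
--             mask |= 1 << (o - 65)
--     return mask == (1 << 26) - 1
-- ===== Notes on version B (the rewrite author's own statement) =====
-- stated objective: alternative
-- what changed: A loops over the 26 alphabet letters, doing a substring scan of the lowercased input for each with an early break; B makes a single pass over the input characters, OR-ing one bit per letter (handling case via the character code instead of lowercasing) into a 26-bit mask, and returns whether the mask is full.
import Mathlib
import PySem

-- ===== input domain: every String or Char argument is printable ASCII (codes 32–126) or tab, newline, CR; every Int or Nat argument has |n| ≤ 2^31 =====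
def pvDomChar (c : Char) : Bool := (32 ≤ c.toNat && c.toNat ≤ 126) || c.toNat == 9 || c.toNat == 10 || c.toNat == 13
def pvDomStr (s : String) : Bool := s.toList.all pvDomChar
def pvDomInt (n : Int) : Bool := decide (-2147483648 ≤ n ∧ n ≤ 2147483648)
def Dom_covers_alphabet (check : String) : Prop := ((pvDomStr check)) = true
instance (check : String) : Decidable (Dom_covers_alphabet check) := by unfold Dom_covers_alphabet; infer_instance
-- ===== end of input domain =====

-- B replaces A's loop over the alphabet (26 substring scans with early break) by a single pass over the string that ORs one bit per letter into a 26-bit mask (alternative algorithm; same behaviour).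


-- ===== PORT A =====
-- A's for-loop over the (typo'd) alphabet string with `break`: early-exit recursion.
def coversLoopA (check : String) : List Char → Bool
  | [] => true
  | c :: rest =>
      if PySem.Str.isIn (String.ofList [c]) check then coversLoopA check rest
      else false

def covers_alphabet (check : String) : Bool :=
  let check := PySem.Str.lower check
  coversLoopA check "abcdefghijklomnopqrstuvwxyz".toList

-- ===== PORT B =====
-- B: one pass over the characters; `maskStep` is the loop body (`mask |= 1 << …`).
def maskStep (m : Nat) (ch : Char) : Nat :=
  if 97 ≤ ch.toNat ∧ ch.toNat ≤ 122 then m ||| (1 <<< (ch.toNat - 97))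
  else if 65 ≤ ch.toNat ∧ ch.toNat ≤ 90 then m ||| (1 <<< (ch.toNat - 65))
  else m

def covers_alphabet_alt (check : String) : Bool :=
  check.toList.foldl maskStep 0 == (1 <<< 26) - 1

-- ===== PRECONDITION & SPEC =====
def Spec_covers_alphabet (check : String) (out : Bool) : Prop := out = covers_alphabet_alt check
instance (check : String) (out : Bool) : Decidable (Spec_covers_alphabet check out) := by unfold Spec_covers_alphabet; infer_instance

-- ===== CLAIM (what is proved, stated in full; the proofs are below) =====
def Claim_equal_covers_alphabet : Prop := ∀ (check : String), Dom_covers_alphabet check → Spec_covers_alphabet check (covers_alphabet check)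

-- ===== LEMMAS AND PROOFS =====

-- "letter ch accounts for alphabet position i" (case-insensitively)
def hitBit (i : Nat) (ch : Char) : Bool :=
  (97 ≤ ch.toNat && ch.toNat ≤ 122 && (ch.toNat - 97 == i)) ||
  (65 ≤ ch.toNat && ch.toNat ≤ 90 && (ch.toNat - 65 == i))

theorem char_eq_iff_toNat (a b : Char) : a = b ↔ a.toNat = b.toNat := by
  constructor
  · intro h; rw [h]
  · intro h; exact Char.ext (UInt32.toNat_inj.mp h)

theorem testBit_maskStep (m : Nat) (ch : Char) (i : Nat) :
    (maskStep m ch).testBit i = (m.testBit i || hitBit i ch) := by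
  unfold maskStep hitBit
  rw [Bool.eq_iff_iff]
  simp only [Bool.or_eq_true, Bool.and_eq_true, decide_eq_true_eq, beq_iff_eq]
  split_ifs with h1 h2
  · simp only [Nat.testBit_lor, Nat.one_shiftLeft, Nat.testBit_two_pow, Bool.or_eq_true,
      decide_eq_true_eq]
    exact or_congr Iff.rfl (by omega)
  · simp only [Nat.testBit_lor, Nat.one_shiftLeft, Nat.testBit_two_pow, Bool.or_eq_true,
      decide_eq_true_eq]
    exact or_congr Iff.rfl (by omega)
  · constructor
    · exact Or.inl
    · intro h
      rcases h with h | h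
      · exact h
      · exfalso; omega

theorem maskStep_lt (m : Nat) (ch : Char) (h : m < 2 ^ 26) : maskStep m ch < 2 ^ 26 := by
  unfold maskStep
  split_ifs with h1 h2
  · exact Nat.or_lt_two_pow h (by rw [Nat.one_shiftLeft]; exact Nat.pow_lt_pow_right (by norm_num) (by omega))
  · exact Nat.or_lt_two_pow h (by rw [Nat.one_shiftLeft]; exact Nat.pow_lt_pow_right (by norm_num) (by omega))
  · exact h

theorem foldl_mask_lt (l : List Char) (m : Nat) (h : m < 2 ^ 26) :
    l.foldl maskStep m < 2 ^ 26 := by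
  induction l generalizing m with
  | nil => exact h
  | cons c rest ih => exact ih _ (maskStep_lt m c h)

theorem testBit_foldl (l : List Char) (m : Nat) (i : Nat) :
    (l.foldl maskStep m).testBit i = (m.testBit i || l.any (hitBit i)) := by
  induction l generalizing m with
  | nil => simp
  | cons c rest ih =>
      simp only [List.foldl_cons, List.any_cons, ih, testBit_maskStep, Bool.or_assoc]

theorem alt_iff (check : String) :
    covers_alphabet_alt check = true ↔ ∀ i < 26, check.toList.any (hitBit i) = true := by
  unfold covers_alphabet_alt
  rw [beq_iff_eq, Nat.one_shiftLeft]
  constructor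
  · intro h i hi
    have hb := congrArg (fun x => Nat.testBit x i) h
    simp only [testBit_foldl, Nat.zero_testBit, Bool.false_or,
      Nat.testBit_two_pow_sub_one, hi, decide_true] at hb
    exact hb
  · intro h
    apply Nat.eq_of_testBit_eq
    intro i
    rw [Nat.testBit_two_pow_sub_one, testBit_foldl]
    by_cases hi : i < 26
    · simpa [hi] using h i hi
    · have hz : (check.toList.foldl maskStep 0).testBit i = false :=
        Nat.testBit_lt_two_pow
          (lt_of_lt_of_le (foldl_mask_lt _ 0 (by norm_num))
            (Nat.pow_le_pow_right (by norm_num) (by omega)))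
      rw [testBit_foldl] at hz
      simp only [Nat.zero_testBit, Bool.false_or] at hz ⊢
      simp [hi, hz]

theorem lowerChar_eq_iff (ch c : Char) (h97 : 97 ≤ c.toNat) (h122 : c.toNat ≤ 122) :
    PySem.Chars.lowerChar ch = c ↔ hitBit (c.toNat - 97) ch = true := by
  have hAZ : PySem.Chars.isupper ch = true ↔ (65 ≤ ch.toNat ∧ ch.toNat ≤ 90) := by
    simp only [PySem.Chars.isupper, Bool.and_eq_true, decide_eq_true_eq, Char.le_def,
      UInt32.le_iff_toNat_le]
    exact Iff.rfl
  unfold PySem.Chars.lowerChar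
  by_cases hu : PySem.Chars.isupper ch = true
  · obtain ⟨hl, hr⟩ := hAZ.mp hu
    have hv : (Char.ofNat (ch.toNat + 32)).toNat = ch.toNat + 32 := by
      have hval : (ch.toNat + 32).isValidChar := Or.inl (by omega)
      rw [Char.toNat_ofNat, if_pos hval]
    rw [if_pos hu, char_eq_iff_toNat, hv]
    simp only [hitBit, Bool.or_eq_true, Bool.and_eq_true, decide_eq_true_eq, beq_iff_eq]
    omega
  · have hnu : ¬(65 ≤ ch.toNat ∧ ch.toNat ≤ 90) := fun hc => hu (hAZ.mpr hc)
    rw [if_neg hu, char_eq_iff_toNat]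
    simp only [hitBit, Bool.or_eq_true, Bool.and_eq_true, decide_eq_true_eq, beq_iff_eq]
    omega

theorem mem_lower_iff (l : List Char) (c : Char) (h97 : 97 ≤ c.toNat) (h122 : c.toNat ≤ 122) :
    c ∈ PySem.Chars.lower l ↔ l.any (hitBit (c.toNat - 97)) = true := by
  simp only [PySem.Chars.lower, List.mem_map, List.any_eq_true]
  constructor
  · rintro ⟨ch, hm, he⟩; exact ⟨ch, hm, (lowerChar_eq_iff ch c h97 h122).mp he⟩
  · rintro ⟨ch, hm, he⟩; exact ⟨ch, hm, (lowerChar_eq_iff ch c h97 h122).mpr he⟩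

-- a single-character substring test is character membership
theorem singleton_infix_iff_mem {c : Char} {l : List Char} : [c] <:+: l ↔ c ∈ l := by
  constructor
  · intro h
    exact List.singleton_sublist.mp h.sublist
  · intro h
    obtain ⟨s, t, rfl⟩ := List.append_of_mem h
    exact ⟨s, t, by simp⟩

theorem coversLoopA_eq_all (check : String) (ls : List Char) :
    coversLoopA check ls = ls.all (fun c => decide (c ∈ check.toList)) := by
  induction ls with
  | nil => rfl
  | cons c rest ih =>
      simp only [coversLoopA, List.all_cons]
      by_cases h : c ∈ check.toList
      · have hin : PySem.Chars.isIn [c] check.toList = true :=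
          (PySem.Chars.isIn_iff_infix _ _).mpr (singleton_infix_iff_mem.mpr h)
        simp [hin, ih, h]
      · have hin : PySem.Chars.isIn [c] check.toList = false :=
          (PySem.Chars.isIn_eq_false_iff _ _).mpr (fun hc => h (singleton_infix_iff_mem.mp hc))
        simp [hin, h]

set_option maxRecDepth 8000 in
theorem A_iff (check : String) :
    covers_alphabet check = true ↔ ∀ i < 26, check.toList.any (hitBit i) = true := by
  unfold covers_alphabet
  rw [coversLoopA_eq_all]
  simp only [List.all_eq_true, decide_eq_true_eq, PySem.Str.toList_lower]
  have habcB : "abcdefghijklmnopqrstuvwxyz".toList.all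
      (fun c => decide (97 ≤ c.toNat) && decide (c.toNat ≤ 122)) = true := by
    simp only [String.toList]; decide
  have habc : ∀ c ∈ "abcdefghijklmnopqrstuvwxyz".toList,
      97 ≤ c.toNat ∧ c.toNat ≤ 122 := by
    intro c hc
    simpa using List.all_eq_true.mp habcB c hc
  have hsub1B : "abcdefghijklmnopqrstuvwxyz".toList.all
      (fun c => "abcdefghijklomnopqrstuvwxyz".toList.contains c) = true := by
    simp only [String.toList]; decide
  have hsub2B : "abcdefghijklomnopqrstuvwxyz".toList.all
      (fun c => "abcdefghijklmnopqrstuvwxyz".toList.contains c) = true := by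
    simp only [String.toList]; decide
  have hsub1 : ∀ c ∈ "abcdefghijklmnopqrstuvwxyz".toList,
      c ∈ "abcdefghijklomnopqrstuvwxyz".toList := fun c hc => by
    simpa using List.all_eq_true.mp hsub1B c hc
  have hsub2 : ∀ c ∈ "abcdefghijklomnopqrstuvwxyz".toList,
      c ∈ "abcdefghijklmnopqrstuvwxyz".toList := fun c hc => by
    simpa using List.all_eq_true.mp hsub2B c hc
  have hmapr : "abcdefghijklmnopqrstuvwxyz".toList.map (fun c => c.toNat - 97)
      = List.range 26 := by
    simp only [String.toList]; decide
  constructor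
  · intro h i hi
    have : i ∈ "abcdefghijklmnopqrstuvwxyz".toList.map (fun c => c.toNat - 97) := by
      rw [hmapr]; exact List.mem_range.mpr hi
    obtain ⟨c, hc, rfl⟩ := List.mem_map.mp this
    exact (mem_lower_iff _ c (habc c hc).1 (habc c hc).2).mp (h c (hsub1 c hc))
  · intro h c hc
    have hc' := hsub2 c hc
    have hi : c.toNat - 97 < 26 := by
      have : c.toNat - 97 ∈ List.range 26 := by
        rw [← hmapr]; exact List.mem_map.mpr ⟨c, hc', rfl⟩
      exact List.mem_range.mp this
    exact (mem_lower_iff _ c (habc c hc').1 (habc c hc').2).mpr (h _ hi)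

-- ===== VERDICT (by name: the statement is the Claim_ definition above) =====
theorem covers_alphabet_spec : Claim_equal_covers_alphabet := by
  intro check _
  unfold Spec_covers_alphabet
  rw [Bool.eq_iff_iff, A_iff, alt_iff]
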